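-- pv_equiv track=rewrite | github.com/loning/mbook-binary | src/binaryuniverse/tests/test_C8_2.py | _enforce_no11
-- ===== SOURCE A (Python) =====
-- def _enforce_no11(binary: str) -> str:
--     """强制执行no-11约束"""
--     result = []
--     for i, bit in enumerate(binary):
--         if i > 0 and result[-1] == '1' and bit == '1':
--             result.append('0')
--         else:
--             result.append(bit)
--     return ''.join(result)
-- ===== SOURCE B (Python) =====
-- from itertools import groupby
--
-- def _enforce_no11(binary: str) -> str:
--     """Run-based construction: split into maximal runs; a run of '1's becomes an
--     alternating 1,0,1,... pattern of the same length, other runs stay verbatim."""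
--     pieces = []
--     for ch, grp in groupby(binary):
--         n = sum(1 for _ in grp)
--         if ch == '1':
--             pieces.append(''.join('1' if j % 2 == 0 else '0' for j in range(n)))
--         else:
--             pieces.append(ch * n)
--     return ''.join(pieces)
-- ===== Notes on version B (the rewrite author's own statement) =====
-- stated objective: alternative
-- what changed: Replaced the per-character state machine that inspects result[-1] with an itertools.groupby run decomposition: each maximal run of '1's is emitted as an alternating 1,0,1,... pattern of its length and every other run is copied verbatim.
import Mathlib
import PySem

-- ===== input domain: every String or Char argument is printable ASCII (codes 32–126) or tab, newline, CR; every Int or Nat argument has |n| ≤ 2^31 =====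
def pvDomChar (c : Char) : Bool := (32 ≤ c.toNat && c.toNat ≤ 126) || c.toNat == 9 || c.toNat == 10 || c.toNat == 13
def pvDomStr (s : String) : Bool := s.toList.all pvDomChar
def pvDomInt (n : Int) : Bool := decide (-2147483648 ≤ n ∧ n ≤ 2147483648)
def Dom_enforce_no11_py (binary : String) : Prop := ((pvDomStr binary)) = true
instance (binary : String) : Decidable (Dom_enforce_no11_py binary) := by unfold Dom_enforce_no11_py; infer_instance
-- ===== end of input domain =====

-- B replaces A's per-character state machine (reading result[-1]) by a groupby run
-- decomposition: '1'-runs become alternating 1,0,1,… patterns, other runs are copied.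

-- ===== PORT A =====
-- literal port of A: enumerate + growing result list, result[-1] inspected each step
def enforce_no11_py (binary : String) : String :=
  let result := (PySem.List.enumerate binary.toList).foldl
    (fun res p =>
      if 0 < p.1 ∧ res.getLast? = some '1' ∧ p.2 = '1'
      then res ++ ['0'] else res ++ [p.2]) []
  String.ofList result

-- ===== PORT B =====
-- groupby(binary): maximal runs as (char, run length), left to right
def pvRuns : List Char → List (Char × Nat)
  | [] => []
  | c :: rest =>
    (c, 1 + (rest.takeWhile (fun x => x == c)).length)
      :: pvRuns (rest.dropWhile (fun x => x == c))
termination_by l => l.length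
decreasing_by
  simp only [List.length_cons]
  exact Nat.lt_succ_of_le (List.length_dropWhile_le _ _)

-- ''.join('1' if j % 2 == 0 else '0' for j in range(n))
def pvAlt (n : Nat) : List Char :=
  (List.range n).map (fun j => if j % 2 = 0 then '1' else '0')

def enforce_no11_py_alt (binary : String) : String :=
  String.ofList ((pvRuns binary.toList).flatMap
    (fun p => if p.1 = '1' then pvAlt p.2 else List.replicate p.2 p.1))

-- ===== PRECONDITION & SPEC =====
def Spec_enforce_no11_py (binary : String) (out : String) : Prop := out = enforce_no11_py_alt binary
instance (binary : String) (out : String) : Decidable (Spec_enforce_no11_py binary out) := by unfold Spec_enforce_no11_py; infer_instance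

-- ===== CLAIM (what is proved, stated in full; the proofs are below) =====
def Claim_equal_enforce_no11_py : Prop := ∀ (binary : String), Dom_enforce_no11_py binary → Spec_enforce_no11_py binary (enforce_no11_py binary)

-- ===== LEMMAS AND PROOFS =====

-- the common state machine: state = "last emitted char is '1'"
def pvStep : Bool → List Char → List Char
  | _, [] => []
  | s, c :: r => if s && (c == '1') then '0' :: pvStep false r else c :: pvStep (c == '1') r

theorem pvA_fold (l : List Char) : ∀ (res : List Char) (k : Int), (res.length : Int) = k →
    (PySem.List.enumerate l k).foldl
      (fun res p =>
        if 0 < p.1 ∧ res.getLast? = some '1' ∧ p.2 = '1'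
        then res ++ ['0'] else res ++ [p.2]) res
    = res ++ pvStep (res.getLast? == some '1') l := by
  induction l with
  | nil => intro res k hk; simp [PySem.List.enumerate, pvStep]
  | cons c r ih =>
    intro res k hk
    rw [PySem.List.enumerate_cons, List.foldl_cons]
    by_cases hc : c = '1'
    · by_cases hl : res.getLast? = some '1'
      · have hne : res ≠ [] := by intro h; simp [h] at hl
        have hk0 : 0 < k := by
          rw [← hk]; exact_mod_cast List.length_pos_of_ne_nil hne
        simp only [hc, hl, hk0, and_true, if_true]
        rw [ih (res ++ ['0']) (k+1) (by simp [← hk])]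
        simp [pvStep, hl]
      · have : ¬ (0 < k ∧ res.getLast? = some '1' ∧ c = '1') := by
          intro ⟨_, h, _⟩; exact hl h
        simp only [this, if_false]
        rw [ih (res ++ [c]) (k+1) (by simp [← hk])]
        simp [pvStep, hl]
    · have : ¬ (0 < k ∧ res.getLast? = some '1' ∧ c = '1') := by
        intro ⟨_, _, h⟩; exact hc h
      simp only [this, if_false]
      rw [ih (res ++ [c]) (k+1) (by simp [← hk])]
      simp [pvStep, hc]

theorem pvB_rep (c : Char) (k : Nat) (r : List Char) (h : (c == '1') = false) :
    pvStep false (List.replicate k c ++ r) = List.replicate k c ++ pvStep false r := by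
  induction k with
  | zero => simp
  | succ n ih => simp [List.replicate_succ, pvStep, h, ih]

theorem pvAlt_two (n : Nat) : pvAlt (2 + n) = '1' :: '0' :: pvAlt n := by
  unfold pvAlt
  rw [List.range_add]
  simp [List.map_map, Function.comp_def, Nat.add_mod_left, List.range_succ]

theorem pvB_ones (k : Nat) : ∀ r, pvStep false (List.replicate k '1' ++ r) = pvAlt k ++ pvStep (k % 2 == 1) r := by
  induction k using Nat.strong_induction_on with
  | _ k ih =>
    match k with
    | 0 => intro r; simp [pvAlt]
    | 1 => intro r; simp [pvStep, pvAlt]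
    | (n+2) =>
      intro r
      have h2 : n + 2 = 2 + n := by omega
      rw [h2, pvAlt_two]
      have : List.replicate (2+n) '1' = '1' :: '1' :: List.replicate n '1' := by
        rw [← h2]; rfl
      rw [this]
      simp only [List.cons_append, pvStep]
      norm_num
      rw [ih n (by omega) r]

theorem pvStep_head (s : Bool) (c : Char) (r : List Char) (h : (c == '1') = false) :
    pvStep s (c :: r) = pvStep false (c :: r) := by
  cases s <;> simp [pvStep, h]

theorem pvDropHead (p : Char → Bool) (l : List Char) :
    ∀ x r, l.dropWhile p = x :: r → p x = false := by
  induction l with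
  | nil => intro x r h; simp [List.dropWhile] at h
  | cons a t ih =>
    intro x r h
    by_cases ha : p a
    · rw [List.dropWhile_cons_of_pos ha] at h; exact ih x r h
    · rw [List.dropWhile_cons_of_neg ha] at h
      cases h; simpa using ha

theorem pvB_runs (l : List Char) :
    (pvRuns l).flatMap (fun p => if p.1 = '1' then pvAlt p.2 else List.replicate p.2 p.1)
    = pvStep false l := by
  induction l using (measure List.length).wf.induction with
  | _ l ih =>
  match l with
  | [] => simp [pvRuns, pvStep]
  | c :: rest =>
    rw [pvRuns]
    set t := rest.takeWhile (fun x => x == c) with ht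
    set d := rest.dropWhile (fun x => x == c) with hd
    have hrep : t = List.replicate t.length c := by
      apply List.eq_replicate_of_mem
      intro x hx
      have := List.mem_takeWhile_imp hx
      simpa using this
    have hsplit : c :: rest = List.replicate (1 + t.length) c ++ d := by
      rw [Nat.add_comm, List.replicate_succ, List.cons_append, ← hrep, ht, hd,
        List.takeWhile_append_dropWhile]
    have hlen : d.length < (c :: rest).length :=
      Nat.lt_succ_of_le (List.length_dropWhile_le _ _)
    have ihd := ih d hlen
    rw [List.flatMap_cons, ihd]
    by_cases hc : c = '1'
    · subst hc
      rw [if_pos rfl]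
      rw [hsplit, pvB_ones (1 + t.length) d]
      congr 1
      match hdd : d with
      | [] => simp [pvStep]
      | x :: r =>
        have hx : (x == '1') = false := pvDropHead _ rest x r hd.symm
        exact (pvStep_head _ x r hx).symm
    · have hcb : (c == '1') = false := by simpa using hc
      simp only [if_neg hc]
      rw [hsplit, pvB_rep c (1 + t.length) d hcb]

-- ===== VERDICT (by name: the statement is the Claim_ definition above) =====
theorem enforce_no11_py_spec : Claim_equal_enforce_no11_py := by
  intro binary _
  unfold Spec_enforce_no11_py enforce_no11_py enforce_no11_py_alt
  rw [pvB_runs, pvA_fold binary.toList [] 0 (by simp)]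
  simp
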